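-- pv_equiv track=rewrite | github.com/YoderBy/gil-bot | manaul_extraction/course_data_parser.py | get_course_blocks
-- ===== SOURCE A (Python) =====
-- def get_course_blocks(lines):
--     blocks = []
--     current_block = []
--     for line in lines:
--         if line.strip().startswith("course:") and current_block:
--             blocks.append(current_block)
--             current_block = []
--         current_block.append(line)
--     if current_block: # Add the last block
--         blocks.append(current_block)
--     return blocks
-- ===== SOURCE B (Python) =====
-- def get_course_blocks(lines):
--     # Cut-at-next-marker: for each block start, scan ahead with an index to
--     # the next "course:" marker (or the end) and slice that whole block out.
--     n = len(lines)
--     blocks = []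
--     start = 0
--     while start < n:
--         i = start + 1
--         while i < n and not lines[i].strip().startswith("course:"):
--             i += 1
--         blocks.append(lines[start:i])
--         start = i
--     return blocks
-- ===== Notes on version B (the rewrite author's own statement) =====
-- stated objective: alternative
-- what changed: B replaces A's accumulate-and-flush-before-marker pass with a cut-at-next-marker decomposition: from each block start it scans an index forward to the next 'course:' marker (or the end) and slices the whole block out at once.
import Mathlib
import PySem

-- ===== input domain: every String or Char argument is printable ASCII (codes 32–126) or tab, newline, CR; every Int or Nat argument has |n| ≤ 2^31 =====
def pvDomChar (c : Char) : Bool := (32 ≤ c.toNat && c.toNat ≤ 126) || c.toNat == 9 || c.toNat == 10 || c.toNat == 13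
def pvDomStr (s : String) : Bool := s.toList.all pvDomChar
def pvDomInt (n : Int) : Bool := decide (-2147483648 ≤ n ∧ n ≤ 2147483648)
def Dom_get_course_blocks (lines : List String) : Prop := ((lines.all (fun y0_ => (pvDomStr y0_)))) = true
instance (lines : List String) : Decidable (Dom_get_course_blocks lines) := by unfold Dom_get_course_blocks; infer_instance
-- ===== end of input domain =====

-- B replaces A's accumulate-and-flush single pass by a cut-at-next-marker decomposition
-- (scan an index ahead to the next marker, slice the block out); same cost (objective: alternative).

-- ===== PORT A =====
-- line.strip().startswith("course:")
def isCourseMarker (line : String) : Bool :=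
  PySem.Str.startswith (PySem.Str.strip line) "course:"

-- one iteration of A's for-loop over state (blocks, current_block)
def stepA (st : List (List String) × List String) (line : String) :
    List (List String) × List String :=
  if isCourseMarker line = true ∧ st.2 ≠ [] then (st.1 ++ [st.2], [line])
  else (st.1, st.2 ++ [line])

def get_course_blocks (lines : List String) : List (List String) :=
  let st := lines.foldl stepA ([], [])
  if st.2 ≠ [] then st.1 ++ [st.2] else st.1

-- ===== PORT B =====
-- B's inner while loop: smallest index j ≥ i with lines[j] a marker, or len(lines)
def scanFrom (lines : List String) (i : Nat) : Nat :=
  if h : i < lines.length then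
    if isCourseMarker lines[i] then i else scanFrom lines (i + 1)
  else i
termination_by lines.length - i

theorem scanFrom_ge (lines : List String) (i : Nat) : i ≤ scanFrom lines i := by
  unfold scanFrom
  split
  · split
    · exact le_refl i
    · exact le_trans (Nat.le_succ i) (scanFrom_ge lines (i + 1))
  · exact le_refl i
termination_by lines.length - i

-- B's outer while loop over start; lines[start:i] is (drop start).take (i-start) (indices in range)
def outerB (lines : List String) (start : Nat) : List (List String) :=
  if _h : start < lines.length then
    let i := scanFrom lines (start + 1)
    ((lines.drop start).take (i - start)) :: outerB lines i
  else []
termination_by lines.length - start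
decreasing_by
  have := scanFrom_ge lines (start + 1)
  omega

def get_course_blocks_alt (lines : List String) : List (List String) :=
  outerB lines 0

-- ===== PRECONDITION & SPEC =====
def Spec_get_course_blocks (lines : List String) (out : List (List String)) : Prop := out = get_course_blocks_alt lines
instance (lines : List String) (out : List (List String)) : Decidable (Spec_get_course_blocks lines out) := by unfold Spec_get_course_blocks; infer_instance

-- ===== CLAIM (what is proved, stated in full; the proofs are below) =====
def Claim_equal_get_course_blocks : Prop := ∀ (lines : List String), Dom_get_course_blocks lines → Spec_get_course_blocks lines (get_course_blocks lines)

-- ===== LEMMAS AND PROOFS =====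

-- reference grouping: blocks split immediately before every marker line (except at position 0)
def Rspec : List String → List (List String)
  | [] => []
  | [l] => [[l]]
  | l :: r :: rest =>
    if isCourseMarker r = true then [l] :: Rspec (r :: rest)
    else (l :: (Rspec (r :: rest)).headI) :: (Rspec (r :: rest)).tail

-- A's loop together with its final flush, as a recursion
def runA : List (List String) → List String → List String → List (List String)
  | blocks, cur, [] => if cur ≠ [] then blocks ++ [cur] else blocks
  | blocks, cur, x :: xs =>
    if isCourseMarker x = true ∧ cur ≠ [] then runA (blocks ++ [cur]) [x] xs
    else runA blocks (cur ++ [x]) xs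

theorem A_eq_runA (xs : List String) : ∀ (blocks : List (List String)) (cur : List String),
    (let st := xs.foldl stepA (blocks, cur);
     if st.2 ≠ [] then st.1 ++ [st.2] else st.1) = runA blocks cur xs := by
  induction xs with
  | nil => intro blocks cur; simp [runA]
  | cons x xs ih =>
    intro blocks cur
    simp only [List.foldl_cons, runA, stepA]
    split
    · exact ih _ _
    · exact ih _ _

theorem runA_prefix (xs : List String) : ∀ (blocks : List (List String)) (cur : List String),
    runA blocks cur xs = blocks ++ runA [] cur xs := by
  induction xs with
  | nil => intro blocks cur; simp [runA]; split <;> simp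
  | cons x xs ih =>
    intro blocks cur
    simp only [runA]
    split
    · rw [ih (blocks ++ [cur]) [x]]
      simp only [List.nil_append]
      rw [ih [cur] [x]]
      simp
    · rw [ih blocks (cur ++ [x]), ih [] (cur ++ [x])]

-- runA started with a non-empty current block cur, expressed via Rspec
def mergeC (cur : List String) : List String → List (List String)
  | [] => [cur]
  | x :: xs =>
    if isCourseMarker x = true then cur :: Rspec (x :: xs)
    else (cur ++ (Rspec (x :: xs)).headI) :: (Rspec (x :: xs)).tail

theorem mergeC_single (x : String) (xs : List String) : mergeC [x] xs = Rspec (x :: xs) := by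
  cases xs with
  | nil =>
    simp only [mergeC, Rspec]
  | cons r rest =>
    cases hr : isCourseMarker r <;> simp [mergeC, Rspec, hr]

theorem runA_key (xs : List String) : ∀ (cur : List String), cur ≠ [] →
    runA [] cur xs = mergeC cur xs := by
  induction xs with
  | nil => intro cur h; simp [runA, mergeC, h]
  | cons x xs ih =>
    intro cur h
    cases hm : isCourseMarker x with
    | true =>
      have heq : runA [] cur (x :: xs) = runA [cur] [x] xs := by
        simp [runA, hm, h]
      rw [heq, runA_prefix, ih [x] (by simp), mergeC_single]
      simp [mergeC, hm]
    | false =>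
      have heq : runA [] cur (x :: xs) = runA [] (cur ++ [x]) xs := by
        simp [runA, hm]
      rw [heq, ih (cur ++ [x]) (by simp)]
      cases xs with
      | nil => simp [mergeC, Rspec, hm]
      | cons r rest =>
        cases hr : isCourseMarker r with
        | true => simp [mergeC, Rspec, hm, hr]
        | false => simp [mergeC, Rspec, hm, hr]

set_option maxHeartbeats 1000000 in
theorem A_eq_Rspec (lines : List String) : get_course_blocks lines = Rspec lines := by
  cases lines with
  | nil => rfl
  | cons l rest =>
    have h1 : get_course_blocks (l :: rest) = runA [] [] (l :: rest) :=
      A_eq_runA (l :: rest) [] []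
    have h2 : runA [] [] (l :: rest) = runA [] [l] rest := by
      have h : ¬ (isCourseMarker l = true ∧ ([] : List String) ≠ []) := by simp
      rw [runA, if_neg h, List.nil_append]
    rw [h1, h2, runA_key rest [l] (by simp), mergeC_single]

-- B side. Length of the marker-free prefix of a list.
def scanLen : List String → Nat
  | [] => 0
  | x :: xs => if isCourseMarker x then 0 else scanLen xs + 1

theorem scanFrom_eq (lines : List String) (i : Nat) :
    scanFrom lines i = i + scanLen (lines.drop i) := by
  unfold scanFrom
  split
  · rename_i h
    have hdrop : lines.drop i = lines[i] :: lines.drop (i + 1) :=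
      List.drop_eq_getElem_cons h
    rw [hdrop]
    cases hm : isCourseMarker lines[i] with
    | true => simp [scanLen, hm]
    | false =>
      rw [if_neg (by simp), scanFrom_eq lines (i + 1),
        show scanLen (lines[i] :: lines.drop (i + 1)) = scanLen (lines.drop (i + 1)) + 1 from by
          simp [scanLen, hm]]
      omega
  · rename_i h
    rw [List.drop_eq_nil_of_le (by omega)]
    simp [scanLen]
termination_by lines.length - i

-- Rspec peels off exactly the head line plus the marker-free prefix of the rest
theorem Rspec_step (rest : List String) : ∀ (l : String),
    Rspec (l :: rest) =
      (l :: rest.take (scanLen rest)) :: Rspec (rest.drop (scanLen rest)) := by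
  induction rest with
  | nil => intro l; simp [Rspec, scanLen]
  | cons r t ih =>
    intro l
    cases hm : isCourseMarker r with
    | true => simp [Rspec, scanLen, hm]
    | false =>
      have hR : Rspec (r :: t) =
          (r :: t.take (scanLen t)) :: Rspec (t.drop (scanLen t)) := ih r
      simp [Rspec, scanLen, hm, hR]

theorem outerB_eq (lines : List String) (start : Nat) :
    outerB lines start = Rspec (lines.drop start) := by
  unfold outerB
  split
  · rename_i h
    have hdrop : lines.drop start = lines[start] :: lines.drop (start + 1) :=
      List.drop_eq_getElem_cons h
    have hscan : scanFrom lines (start + 1) = (start + 1) + scanLen (lines.drop (start + 1)) :=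
      scanFrom_eq lines (start + 1)
    show ((lines.drop start).take (scanFrom lines (start + 1) - start))
        :: outerB lines (scanFrom lines (start + 1)) = Rspec (lines.drop start)
    rw [outerB_eq lines (scanFrom lines (start + 1))]
    rw [hdrop, Rspec_step]
    congr 1
    · rw [hscan]
      have h2 : (start + 1) + scanLen (lines.drop (start + 1)) - start
           = scanLen (lines.drop (start + 1)) + 1 := by omega
      rw [h2, List.take_succ_cons]
    · rw [hscan]
      congr 1
      rw [List.drop_drop]
  · rename_i h
    rw [List.drop_eq_nil_of_le (by omega)]
    rfl
termination_by lines.length - start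
decreasing_by
  have := scanFrom_ge lines (start + 1)
  omega

theorem B_eq_Rspec (lines : List String) : get_course_blocks_alt lines = Rspec lines := by
  rw [get_course_blocks_alt, outerB_eq, List.drop_zero]

-- ===== VERDICT (by name: the statement is the Claim_ definition above) =====
theorem get_course_blocks_spec : Claim_equal_get_course_blocks := by
  intro lines _
  unfold Spec_get_course_blocks
  rw [A_eq_Rspec, B_eq_Rspec]
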